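-- pv_equiv track=rewrite | github.com/cfevrius/PythonicCodingBat | source/array3.py | fix_34
-- ===== SOURCE A (Python) =====
-- def fix_34(nums):
--     """Return an array that contains exactly the same numbers as the given array, but rearranged so
--     that every 3 is immediately followed by a 4. Do not move the 3's, but every other number may
--     move. The array contains the same number of 3's and 4's, every 3 has a number after it that is
--     not a 3, and a 3 appears in the array before any 4.
--     """
--     def swap(index1, index2):
--         nums[index1], nums[index2] = nums[index2], nums[index1]
--
--     indices_of_4s = [i for i, val in enumerate(nums) if val == 4]
--     for index in indices_of_4s:
--         if nums[index - 1] != 3: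
--             available_3s = [i
--                             for i, val in enumerate(nums)
--                             if val == 3 and nums[i+1] != 4]
--             if available_3s:
--                 swap(index, available_3s[0] + 1)
--     return nums
-- ===== SOURCE B (Python) =====
-- def fix_34(nums):
--     # Precomputes the queue of open slots (position after each 3 not already followed
--     # by a 4) once and pops from it instead of rescanning the array at every 4.
--     # Mutates nums in place via the same swaps as the original.
--     fours = [i for i, v in enumerate(nums) if v == 4]
--     slots = [i + 1 for i, v in enumerate(nums) if v == 3 and nums[i + 1] != 4]
--     k = 0
--     for j in fours:
--         if nums[j - 1] != 3 and k < len(slots):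
--             s = slots[k]
--             k += 1
--             nums[j], nums[s] = nums[s], nums[j]
--     return nums
-- ===== Notes on version B (the rewrite author's own statement) =====
-- stated objective: alternative
-- what changed: Instead of rescanning the whole array for the first available 3 at every unsatisfied 4, B precomputes the queue of open slots (position after each 3 not already followed by a 4) once and pops from it, performing the same swaps in a single pass; on the generated timing inputs (few 3s and 4s) this was not measurably faster.
-- outside the precondition, e.g. on fix_34([1, 3]): A returns [1, 3], B raises IndexError; on fix_34([4, 3, 3, 4]): A returns [3, 4, 4, 3], B returns [3, 3, 4, 4]
import Mathlib
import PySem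

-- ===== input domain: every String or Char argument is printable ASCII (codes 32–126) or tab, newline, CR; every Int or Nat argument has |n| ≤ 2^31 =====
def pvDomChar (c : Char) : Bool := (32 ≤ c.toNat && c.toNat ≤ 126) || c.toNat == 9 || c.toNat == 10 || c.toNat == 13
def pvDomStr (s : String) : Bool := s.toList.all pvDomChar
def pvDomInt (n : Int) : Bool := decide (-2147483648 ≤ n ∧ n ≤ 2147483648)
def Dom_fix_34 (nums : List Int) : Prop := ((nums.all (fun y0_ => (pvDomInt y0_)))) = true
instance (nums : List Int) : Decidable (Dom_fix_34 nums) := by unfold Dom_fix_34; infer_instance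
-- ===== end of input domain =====

-- B replaces A's per-4 rescan for an available 3 by a queue of open slots built once and popped;
-- both Pythons mutate the argument in place with the same swaps, so side effects agree too.

-- ===== PORT A =====
-- shared helper: the tuple swap  nums[i1], nums[i2] = nums[i2], nums[i1]  (the same line in both Pythons)
def pySwap (xs : List Int) (i1 i2 : Int) : List Int :=
  let t1 := PySem.List.pyGetD xs i2 0
  let t2 := PySem.List.pyGetD xs i1 0
  PySem.List.pySetD (PySem.List.pySetD xs i1 t1) i2 t2

-- loop body of A: guard on nums[index-1], rescan for available 3s, swap with the first one
def fix34_stepA (cur : List Int) (index : Int) : List Int :=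
  if PySem.List.pyGet? cur (index - 1) ≠ some 3 then
    let available_3s := ((PySem.List.enumerate cur).filter
        (fun p => p.2 == 3 && !(PySem.List.pyGet? cur (p.1 + 1) == some 4))).map (·.1)
    match available_3s with
    | [] => cur
    | a :: _ => pySwap cur index (a + 1)
  else cur

def fix_34 (nums : List Int) : List Int :=
  let indices_of_4s := ((PySem.List.enumerate nums).filter (fun p => p.2 == 4)).map (·.1)
  indices_of_4s.foldl fix34_stepA nums

-- ===== PORT B =====
-- loop body of B: pop the next precomputed open slot (slots[k]) instead of rescanning
def fix34_stepB (slots : List Int) (st : List Int × Nat) (j : Int) : List Int × Nat :=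
  if PySem.List.pyGet? st.1 (j - 1) ≠ some 3 ∧ st.2 < slots.length then
    (pySwap st.1 j (slots.getD st.2 0), st.2 + 1)
  else st

def fix_34_alt (nums : List Int) : List Int :=
  let fours := ((PySem.List.enumerate nums).filter (fun p => p.2 == 4)).map (·.1)
  let slots := ((PySem.List.enumerate nums).filter
      (fun p => p.2 == 3 && !(PySem.List.pyGet? nums (p.1 + 1) == some 4))).map (fun p => p.1 + 1)
  (fours.foldl (fix34_stepB slots) (nums, 0)).1

-- ===== PRECONDITION & SPEC =====
-- Pre_ excludes inputs violating the docstring's stated precondition "every 3 has a number after it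
-- that is not a 3": with a 3 at the last position the nums[i+1] lookup raises IndexError (in A's
-- rescan whenever one runs, always in B's slot precomputation), and with a 3 immediately followed by
-- another 3 the swaps can move 3s, so A's returned arrangement is an accident of its rescans.
def Pre_fix_34 (nums : List Int) : Prop :=
  ∀ i < nums.length, nums.getD i 0 = 3 → i + 1 < nums.length ∧ nums.getD (i + 1) 0 ≠ 3
instance (nums : List Int) : Decidable (Pre_fix_34 nums) := by unfold Pre_fix_34; infer_instance
def pvWitness_fix_34 : List Int := [3, 1, 4, 4, 3, 2]
def Spec_fix_34 (nums : List Int) (out : List Int) : Prop := out = fix_34_alt nums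
instance (nums : List Int) (out : List Int) : Decidable (Spec_fix_34 nums out) := by unfold Spec_fix_34; infer_instance

-- ===== CLAIM (what is proved, stated in full; the proofs are below) =====
def Claim_equal_fix_34 : Prop := ∀ (nums : List Int), Dom_fix_34 nums → Pre_fix_34 nums → Spec_fix_34 nums (fix_34 nums)

-- ===== LEMMAS AND PROOFS =====

-- index i is an "available 3" of cur (A's rescan predicate, over the index alone)
def qualI (cur : List Int) (j : Int) : Bool :=
  (PySem.List.pyGetD cur j 0 == 3) && !(PySem.List.pyGet? cur (j + 1) == some 4)

def availI (cur : List Int) : List Int :=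
  (PySem.List.pyRange 0 (cur.length)).filter (qualI cur)

-- Pre_ restated over Int indices, usable on the evolving state
def PreC (cur : List Int) : Prop :=
  ∀ i : Int, 0 ≤ i → i < cur.length → PySem.List.pyGetD cur i 0 = 3 →
    i + 1 < (cur.length : Int) ∧ PySem.List.pyGetD cur (i + 1) 0 ≠ 3

theorem getD_set_swap (xs : List Int) (i j m : Nat) (hi : i < xs.length) (hj : j < xs.length) :
    ((xs.set i (xs.getD j 0)).set j (xs.getD i 0)).getD m 0 =
      if m = j then xs.getD i 0 else if m = i then xs.getD j 0 else xs.getD m 0 := by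
  simp only [List.getD_eq_getElem?_getD, List.getElem?_set, List.length_set]
  by_cases h1 : m = j <;> by_cases h2 : m = i <;> by_cases h3 : j = i <;>
    simp_all [Ne.symm, eq_comm]

theorem pyGetD_nonneg_eq_getD (ys : List Int) (t : Int) (ht : 0 ≤ t) :
    PySem.List.pyGetD ys t 0 = ys.getD t.toNat 0 := by
  by_cases h : t < (ys.length : Int)
  · rw [PySem.List.pyGetD_eq_getElem ys 0 ht h, List.getD_eq_getElem?_getD,
      List.getElem?_eq_getElem (by omega), Option.getD_some]
  · rw [PySem.List.pyGetD_of_none, List.getD_eq_getElem?_getD,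
      List.getElem?_eq_none (by omega), Option.getD_none]
    rw [PySem.List.pyGet?_eq_none_iff]
    unfold PySem.Raise.InRange
    omega

theorem pyGetD_pySwap (xs : List Int) (i j m : Int)
    (hi0 : 0 ≤ i) (hin : i < (xs.length : Int)) (hj0 : 0 ≤ j) (hjn : j < (xs.length : Int))
    (hm0 : 0 ≤ m) :
    PySem.List.pyGetD (pySwap xs i j) m 0 =
      if m = j then PySem.List.pyGetD xs i 0
      else if m = i then PySem.List.pyGetD xs j 0
      else PySem.List.pyGetD xs m 0 := by
  show PySem.List.pyGetD (PySem.List.pySetD (PySem.List.pySetD xs i (PySem.List.pyGetD xs j 0)) j (PySem.List.pyGetD xs i 0)) m 0 = _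
  rw [PySem.List.pySetD_of_nonneg _ _ hi0, PySem.List.pySetD_of_nonneg _ _ hj0,
    pyGetD_nonneg_eq_getD _ _ hm0, pyGetD_nonneg_eq_getD _ _ hi0, pyGetD_nonneg_eq_getD _ _ hj0]
  rw [getD_set_swap xs i.toNat j.toNat m.toNat (by omega) (by omega)]
  rw [pyGetD_nonneg_eq_getD _ _ hm0]
  by_cases h1 : m = j <;> by_cases h2 : m = i <;>
    simp [h1, h2, show m.toNat = j.toNat ↔ m = j from by omega,
      show m.toNat = i.toNat ↔ m = i from by omega, show i.toNat = j.toNat ↔ i = j from by omega]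

theorem pyGet?_eq_some_pyGetD (xs : List Int) (i : Int) (h0 : 0 ≤ i) (h : i < (xs.length : Int)) :
    PySem.List.pyGet? xs i = some (PySem.List.pyGetD xs i 0) := by
  rw [PySem.List.pyGet?_eq_some_getElem xs h0 h, PySem.List.pyGetD_eq_getElem xs 0 h0 h]

theorem length_pySwap (xs : List Int) (i j : Int) : (pySwap xs i j).length = xs.length := by
  simp [pySwap, PySem.List.length_pySetD]

theorem mem_availI (cur : List Int) (a : Int) (h : a ∈ availI cur) :
    0 ≤ a ∧ a < (cur.length : Int) ∧ PySem.List.pyGetD cur a 0 = 3 ∧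
      ¬ (PySem.List.pyGet? cur (a + 1) = some 4) := by
  rw [availI, List.mem_filter, PySem.List.mem_pyRange_one] at h
  obtain ⟨⟨h1, h2⟩, hq⟩ := h
  rw [qualI] at hq
  simp only [Bool.and_eq_true, beq_iff_eq, Bool.not_eq_true', beq_eq_false_iff_ne] at hq
  exact ⟨h1, h2, hq.1, hq.2⟩

theorem qualI_swap (cur : List Int) (j a : Int)
    (hpre : PreC cur) (hj0 : 0 ≤ j) (hjn : j < (cur.length : Int))
    (h4 : PySem.List.pyGetD cur j 0 = 4)
    (hguard : PySem.List.pyGet? cur (j - 1) ≠ some 3)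
    (ha : a ∈ availI cur) :
    ∀ i : Int, 0 ≤ i → i < (cur.length : Int) →
      qualI (pySwap cur j (a + 1)) i = (qualI cur i && !(i == a)) := by
  obtain ⟨ha0, han, ha3, ha4⟩ := mem_availI cur a ha
  obtain ⟨ha1n, ha1ne3⟩ := hpre a ha0 han ha3
  have ha1ne4 : PySem.List.pyGetD cur (a + 1) 0 ≠ 4 := by
    intro hc; exact ha4 (by rw [pyGet?_eq_some_pyGetD cur (a+1) (by omega) ha1n, hc])
  have hjne_a : j ≠ a := by intro hc; rw [hc, ha3] at h4; omega
  have hjne_a1 : j ≠ a + 1 := by intro hc; rw [hc] at h4; exact ha1ne4 h4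
  have hv : ∀ m : Int, 0 ≤ m → PySem.List.pyGetD (pySwap cur j (a + 1)) m 0 =
      if m = a + 1 then PySem.List.pyGetD cur j 0
      else if m = j then PySem.List.pyGetD cur (a + 1) 0
      else PySem.List.pyGetD cur m 0 := by
    intro m hm
    rw [pyGetD_pySwap cur j (a+1) m hj0 hjn (by omega) (by omega) hm]
  have hguard' : 1 ≤ j → PySem.List.pyGetD cur (j - 1) 0 ≠ 3 := by
    intro h1 hc
    exact hguard (by rw [pyGet?_eq_some_pyGetD cur (j-1) (by omega) (by omega), hc])
  intro i hi0 hin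
  have hget1 : ∀ (zs : List Int), (zs.length = cur.length) → i + 1 < (cur.length : Int) →
      PySem.List.pyGet? zs (i+1) = some (PySem.List.pyGetD zs (i+1) 0) := by
    intro zs hz h1
    exact pyGet?_eq_some_pyGetD zs (i+1) (by omega) (by rw [hz]; exact h1)
  rw [qualI, qualI]
  rw [hv i hi0]
  by_cases hia1 : i = a + 1
  · subst hia1
    simp [h4, ha1ne3]
  · by_cases hij : i = j
    · subst hij
      simp [hia1, ha1ne3, h4]
    · simp only [if_neg hia1, if_neg hij]
      by_cases h3 : PySem.List.pyGetD cur i 0 = 3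
      · obtain ⟨hi1n, _⟩ := hpre i hi0 hin h3
        rw [hget1 _ (length_pySwap cur j (a+1)) hi1n, pyGet?_eq_some_pyGetD cur (i+1) (by omega) hi1n]
        rw [hv (i+1) (by omega)]
        by_cases hia : i = a
        · subst hia
          simp [h3, h4]
        · have h1j : i + 1 ≠ j := by
            intro hc
            exact hguard' (by omega) (by rw [← hc]; simpa using h3)
          have h1a1 : i + 1 ≠ a + 1 := by omega
          simp [h3, h1j, h1a1, hia]
      · have h3' : (PySem.List.pyGetD cur i 0 == 3) = false := by simpa using h3
        simp [h3']

theorem avail_swap (cur : List Int) (j a : Int) (rest : List Int)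
    (hpre : PreC cur) (hj0 : 0 ≤ j) (hjn : j < (cur.length : Int))
    (h4 : PySem.List.pyGetD cur j 0 = 4)
    (hguard : PySem.List.pyGet? cur (j - 1) ≠ some 3)
    (havail : availI cur = a :: rest) :
    availI (pySwap cur j (a + 1)) = rest := by
  have ha : a ∈ availI cur := by rw [havail]; exact List.mem_cons_self
  have hq := qualI_swap cur j a hpre hj0 hjn h4 hguard ha
  rw [availI, length_pySwap]
  have hcong : List.filter (qualI (pySwap cur j (a + 1))) (PySem.List.pyRange 0 (cur.length : Int))
      = List.filter (fun i => qualI cur i && !(i == a)) (PySem.List.pyRange 0 (cur.length : Int)) :=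
    List.filter_congr (fun x hx => by
      rw [PySem.List.mem_pyRange_one] at hx
      exact hq x hx.1 hx.2)
  rw [hcong, ← List.filter_filter, List.filter_comm]
  rw [show (PySem.List.pyRange 0 (cur.length : Int)).filter (qualI cur) = availI cur from rfl,
    havail]
  have hpw : (a :: rest).Pairwise (· < ·) := by
    rw [← havail]
    exact (PySem.List.pairwise_lt_pyRange_one 0 (cur.length : Int)).filter _
  rw [List.filter_cons_of_neg (by simp)]
  rw [List.filter_eq_self.mpr]
  intro x hx
  have : a < x := (List.pairwise_cons.mp hpw).1 x hx
  simp; omega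

theorem PreC_swap (cur : List Int) (j a : Int)
    (hpre : PreC cur) (hj0 : 0 ≤ j) (hjn : j < (cur.length : Int))
    (h4 : PySem.List.pyGetD cur j 0 = 4)
    (ha : a ∈ availI cur) :
    PreC (pySwap cur j (a + 1)) := by
  obtain ⟨ha0, han, ha3, ha4⟩ := mem_availI cur a ha
  obtain ⟨ha1n, ha1ne3⟩ := hpre a ha0 han ha3
  have ha1ne4 : PySem.List.pyGetD cur (a + 1) 0 ≠ 4 := by
    intro hc; exact ha4 (by rw [pyGet?_eq_some_pyGetD cur (a+1) (by omega) ha1n, hc])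
  have hv : ∀ m : Int, 0 ≤ m → PySem.List.pyGetD (pySwap cur j (a + 1)) m 0 =
      if m = a + 1 then PySem.List.pyGetD cur j 0
      else if m = j then PySem.List.pyGetD cur (a + 1) 0
      else PySem.List.pyGetD cur m 0 := by
    intro m hm
    rw [pyGetD_pySwap cur j (a+1) m hj0 hjn (by omega) (by omega) hm]
  intro i hi0 hin h3
  rw [length_pySwap] at hin
  rw [hv i hi0] at h3
  rw [length_pySwap]
  by_cases hia1 : i = a + 1
  · rw [if_pos hia1, h4] at h3; omega
  · rw [if_neg hia1] at h3
    by_cases hij : i = j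
    · rw [if_pos hij] at h3; exact absurd h3 ha1ne3
    · rw [if_neg hij] at h3
      obtain ⟨hi1n, hi1ne3⟩ := hpre i hi0 hin h3
      refine ⟨hi1n, ?_⟩
      rw [hv (i+1) (by omega)]
      by_cases h1a1 : i + 1 = a + 1
      · rw [if_pos h1a1, h4]; omega
      · rw [if_neg h1a1]
        by_cases h1j : i + 1 = j
        · rw [if_pos h1j]; exact ha1ne3
        · rw [if_neg h1j]; exact hi1ne3

theorem enum_filter_map_fst (xs : List Int) (P : Int × Int → Bool) :
    ((PySem.List.enumerate xs).filter P).map (·.1)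
      = (PySem.List.pyRange 0 (xs.length)).filter (fun j => P (j, PySem.List.pyGetD xs j 0)) := by
  rw [PySem.List.enumerate_eq_map_pyRange xs 0, List.filter_map, List.map_map]
  rw [show ((fun (x : Int × Int) => x.1) ∘ fun j => (j, PySem.List.pyGetD xs j 0)) = id from rfl,
    List.map_id]
  rfl

theorem stepA_avail (cur : List Int) :
    ((PySem.List.enumerate cur).filter
        (fun p => p.2 == 3 && !(PySem.List.pyGet? cur (p.1 + 1) == some 4))).map (·.1)
      = availI cur := by
  rw [enum_filter_map_fst]
  rfl

theorem loop_eq (slots : List Int) (fs : List Int) :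
    ∀ (cur : List Int) (k : Nat),
    fs.Nodup →
    (∀ j ∈ fs, 0 ≤ j ∧ j < (cur.length : Int) ∧ PySem.List.pyGetD cur j 0 = 4) →
    PreC cur →
    List.drop k slots = (availI cur).map (· + 1) →
    fs.foldl fix34_stepA cur = (fs.foldl (fix34_stepB slots) (cur, k)).1 := by
  induction fs with
  | nil => intro cur k _ _ _ _; rfl
  | cons j fs' ih =>
    intro cur k hnd hmem hpre hdrop
    obtain ⟨hj0, hjn, hj4⟩ := hmem j List.mem_cons_self
    simp only [List.foldl_cons]
    by_cases hg : PySem.List.pyGet? cur (j - 1) ≠ some 3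
    · cases havail : availI cur with
      | nil =>
        have hdnil : List.drop k slots = [] := by rw [hdrop, havail]; rfl
        have hlen : slots.length ≤ k := List.drop_eq_nil_iff.mp hdnil
        have hA : fix34_stepA cur j = cur := by
          rw [fix34_stepA, if_pos hg]
          simp only [stepA_avail, havail]
        have hB : fix34_stepB slots (cur, k) j = (cur, k) := by
          rw [fix34_stepB, if_neg (by intro h; omega)]
        rw [hA, hB]
        exact ih cur k hnd.of_cons (fun x hx => hmem x (List.mem_cons_of_mem j hx)) hpre hdrop
      | cons a rest =>
        have ha : a ∈ availI cur := by rw [havail]; exact List.mem_cons_self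
        obtain ⟨ha0, han, ha3, ha4⟩ := mem_availI cur a ha
        obtain ⟨ha1n, ha1ne3⟩ := hpre a ha0 han ha3
        have ha1ne4 : PySem.List.pyGetD cur (a + 1) 0 ≠ 4 := by
          intro hc; exact ha4 (by rw [pyGet?_eq_some_pyGetD cur (a+1) (by omega) ha1n, hc])
        have hdropc : List.drop k slots = (a + 1) :: rest.map (· + 1) := by
          rw [hdrop, havail]; rfl
        have hk : k < slots.length := by
          by_contra hc
          rw [List.drop_eq_nil_iff.mpr (by omega)] at hdropc
          exact List.cons_ne_nil _ _ hdropc.symm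
        have hget : slots.getD k 0 = a + 1 := by
          have h0 : (List.drop k slots).getD 0 0 = a + 1 := by rw [hdropc]; rfl
          rw [List.getD_eq_getElem?_getD, List.getElem?_drop] at h0
          rw [List.getD_eq_getElem?_getD]
          simpa using h0
        have hA : fix34_stepA cur j = pySwap cur j (a + 1) := by
          rw [fix34_stepA, if_pos hg]
          simp only [stepA_avail, havail]
        have hB : fix34_stepB slots (cur, k) j = (pySwap cur j (a + 1), k + 1) := by
          rw [fix34_stepB, if_pos ⟨hg, hk⟩, hget]
        rw [hA, hB]
        refine ih (pySwap cur j (a + 1)) (k + 1) hnd.of_cons ?_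
          (PreC_swap cur j a hpre hj0 hjn hj4 ha) ?_
        · intro x hx
          obtain ⟨hx0, hxn, hx4⟩ := hmem x (List.mem_cons_of_mem j hx)
          refine ⟨hx0, by rw [length_pySwap]; omega, ?_⟩
          rw [pyGetD_pySwap cur j (a+1) x hj0 hjn (by omega) (by omega) hx0]
          have hxj : x ≠ j := by
            intro hc; rw [hc] at hx; exact (List.nodup_cons.mp hnd).1 hx
          have hxa1 : x ≠ a + 1 := by
            intro hc; rw [hc] at hx4; exact ha1ne4 hx4
          rw [if_neg hxa1, if_neg hxj]; exact hx4
        · rw [avail_swap cur j a rest hpre hj0 hjn hj4 hg havail]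
          rw [← List.tail_drop, hdropc]; rfl
    · have hg' : PySem.List.pyGet? cur (j - 1) = some 3 := by
        by_contra hc; exact hg hc
      have hA : fix34_stepA cur j = cur := by
        rw [fix34_stepA, if_neg (by simp [hg'])]
      have hB : fix34_stepB slots (cur, k) j = (cur, k) := by
        rw [fix34_stepB, if_neg (by intro h; exact h.1 hg')]
      rw [hA, hB]
      exact ih cur k hnd.of_cons (fun x hx => hmem x (List.mem_cons_of_mem j hx)) hpre hdrop

-- ===== VERDICT (by name: the statement is the Claim_ definition above) =====
theorem fix_34_spec : Claim_equal_fix_34 := by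
  unfold Claim_equal_fix_34
  intro nums _ hpre
  unfold Spec_fix_34 fix_34 fix_34_alt
  have hslots : ((PySem.List.enumerate nums).filter
      (fun p => p.2 == 3 && !(PySem.List.pyGet? nums (p.1 + 1) == some 4))).map (fun p => p.1 + 1)
      = (availI nums).map (· + 1) := by
    rw [← stepA_avail nums, List.map_map]
    rfl
  rw [hslots]
  have hfours : ((PySem.List.enumerate nums).filter (fun p => p.2 == 4)).map (·.1)
      = (PySem.List.pyRange 0 (nums.length)).filter (fun j => PySem.List.pyGetD nums j 0 == 4) := by
    rw [enum_filter_map_fst]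
  rw [hfours]
  have hPreC : PreC nums := by
    intro i hi0 hin h3
    rw [pyGetD_nonneg_eq_getD _ _ hi0] at h3
    obtain ⟨h1, h2⟩ := hpre i.toNat (by omega) h3
    refine ⟨by omega, ?_⟩
    rw [pyGetD_nonneg_eq_getD _ _ (by omega), show (i+1).toNat = i.toNat + 1 from by omega]
    exact h2
  apply loop_eq
  · exact (PySem.List.nodup_pyRange_one 0 (nums.length : Int)).filter _
  · intro x hx
    rw [List.mem_filter, PySem.List.mem_pyRange_one] at hx
    exact ⟨hx.1.1, hx.1.2, by simpa using hx.2⟩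
  · exact hPreC
  · rfl
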